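-- pv_equiv track=rewrite | github.com/Vp-7777/AutisMind-AI | backend/algorithms/csp_schedule.py | _behavioral_first_if_present
-- ===== SOURCE A (Python) =====
-- SLOT_VARS = ("early_week_slot", "mid_week_slot", "late_week_slot")
--
-- def _behavioral_first_if_present(assignments: dict[str, str], behavioral_phrase: str) -> bool:
--     """
--     Soft-clinical ordering constraint for demos:
--
--     If the behavioral therapy string is used at all, prefer it earlier in the week
--     (lower index in SLOT_VARS) than other assigned therapies when possible.
--
--     Enforced as: if behavioral appears in two slots, fail; if it appears after a
--     non-behavioral in slot order, fail.
--     """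
--     slots_in_order = list(SLOT_VARS)
--     behavioral_slots = [s for s in slots_in_order if assignments.get(s) == behavioral_phrase]
--     if not behavioral_slots:
--         return True
--     # Only one slot should hold behavioral if it exists; all_different already guards duplicates.
--     beh_slot = behavioral_slots[0]
--     beh_index = slots_in_order.index(beh_slot)
--     for s in slots_in_order:
--         if s == beh_slot:
--             continue
--         val = assignments.get(s)
--         if val and val != behavioral_phrase:
--             if slots_in_order.index(s) < beh_index:
--                 return False
--     return True
-- ===== SOURCE B (Python) =====
-- SLOT_VARS = ("early_week_slot", "mid_week_slot", "late_week_slot")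
--
-- def _behavioral_first_if_present(assignments: dict[str, str], behavioral_phrase: str) -> bool:
--     """Single forward pass: on the first behavioral slot, succeed iff no
--     non-behavioral therapy was already seen earlier in the week."""
--     seen_nonbehavioral = False
--     for s in SLOT_VARS:
--         val = assignments.get(s)
--         if val == behavioral_phrase:
--             return not seen_nonbehavioral
--         if val:
--             seen_nonbehavioral = True
--     return True
-- ===== Notes on version B (the rewrite author's own statement) =====
-- stated objective: simpler
-- what changed: Replaced A's two-phase scheme (build the list of behavioral slots, then re-scan all slots comparing .index positions against the first behavioral slot's index) with a single forward pass over SLOT_VARS carrying one seen_nonbehavioral flag that returns immediately at the first behavioral slot.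
import Mathlib
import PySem

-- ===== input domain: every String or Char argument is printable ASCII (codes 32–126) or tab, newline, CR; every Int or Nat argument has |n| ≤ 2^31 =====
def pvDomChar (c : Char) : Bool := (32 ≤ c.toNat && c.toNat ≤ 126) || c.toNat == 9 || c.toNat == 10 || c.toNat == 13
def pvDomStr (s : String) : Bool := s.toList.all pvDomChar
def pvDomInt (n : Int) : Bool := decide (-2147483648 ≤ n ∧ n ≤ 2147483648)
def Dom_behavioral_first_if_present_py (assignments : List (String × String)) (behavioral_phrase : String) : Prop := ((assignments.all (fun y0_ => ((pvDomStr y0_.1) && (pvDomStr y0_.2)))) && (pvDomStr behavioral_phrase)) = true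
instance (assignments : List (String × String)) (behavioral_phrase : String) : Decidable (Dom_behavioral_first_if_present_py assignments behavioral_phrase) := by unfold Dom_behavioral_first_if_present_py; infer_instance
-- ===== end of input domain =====

-- B replaces A's two-phase scheme (filter behavioral slots, then re-scan comparing list indices)
-- by one forward pass with a seen_nonbehavioral flag: simpler, same result (return value only).

-- ===== PORT A =====
-- SLOT_VARS
def pvSlots : List String := ["early_week_slot", "mid_week_slot", "late_week_slot"]

-- the for-loop of A: skip beh_slot, fail on an assigned non-behavioral slot earlier than beh_index
def pvALoop (assignments : List (String × String)) (phrase beh_slot : String)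
    (beh_index : Nat) : List String → Bool
  | [] => true
  | s :: rest =>
    if s == beh_slot then pvALoop assignments phrase beh_slot beh_index rest
    else
      match assignments.lookup s with   -- assignments.get(s); assoc-list lookup = first match
      | none => pvALoop assignments phrase beh_slot beh_index rest   -- None is falsy
      | some v =>
        if v ≠ "" && v ≠ phrase then    -- `if val and val != behavioral_phrase`
          if (PySem.List.index? pvSlots s).getD 0 < beh_index then false
          else pvALoop assignments phrase beh_slot beh_index rest
        else pvALoop assignments phrase beh_slot beh_index rest

def behavioral_first_if_present_py (assignments : List (String × String)) (behavioral_phrase : String) : Bool :=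
  let slots := pvSlots
  let behavioral_slots := slots.filter (fun s => assignments.lookup s == some behavioral_phrase)
  match behavioral_slots with
  | [] => true
  | beh_slot :: _ =>
    let beh_index := (PySem.List.index? slots beh_slot).getD 0   -- .index always succeeds here
    pvALoop assignments behavioral_phrase beh_slot beh_index slots

-- ===== PORT B =====
-- single pass with the seen_nonbehavioral accumulator (Source B)
def pvBLoop (assignments : List (String × String)) (phrase : String) :
    List String → Bool → Bool
  | [], _ => true
  | s :: rest, seen =>
    match assignments.lookup s with     -- val = assignments.get(s)
    | some v =>
      if v == phrase then !seen         -- `if val == behavioral_phrase: return not seen`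
      else if v ≠ "" then pvBLoop assignments phrase rest true   -- `if val:` truthy
      else pvBLoop assignments phrase rest seen
    | none => pvBLoop assignments phrase rest seen   -- None ≠ phrase, None falsy

def behavioral_first_if_present_py_alt (assignments : List (String × String)) (behavioral_phrase : String) : Bool :=
  pvBLoop assignments behavioral_phrase pvSlots false

-- ===== PRECONDITION & SPEC =====
def Spec_behavioral_first_if_present_py (assignments : List (String × String)) (behavioral_phrase : String) (out : Bool) : Prop := out = behavioral_first_if_present_py_alt assignments behavioral_phrase
instance (assignments : List (String × String)) (behavioral_phrase : String) (out : Bool) : Decidable (Spec_behavioral_first_if_present_py assignments behavioral_phrase out) := by unfold Spec_behavioral_first_if_present_py; infer_instance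

-- ===== CLAIM (what is proved, stated in full; the proofs are below) =====
def Claim_equal_behavioral_first_if_present_py : Prop := ∀ (assignments : List (String × String)) (behavioral_phrase : String), Dom_behavioral_first_if_present_py assignments behavioral_phrase → Spec_behavioral_first_if_present_py assignments behavioral_phrase (behavioral_first_if_present_py assignments behavioral_phrase)

-- ===== LEMMAS AND PROOFS =====
-- Both sides depend on the inputs only through the three lookups and the phrase.
set_option maxHeartbeats 2000000 in
theorem key_lemma (v1 v2 v3 : Option String) (p : String)
    (a : List (String × String))
    (h1 : a.lookup "early_week_slot" = v1) (h2 : a.lookup "mid_week_slot" = v2)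
    (h3 : a.lookup "late_week_slot" = v3) :
    behavioral_first_if_present_py a p = behavioral_first_if_present_py_alt a p := by
  simp only [behavioral_first_if_present_py, behavioral_first_if_present_py_alt,
    pvSlots, pvALoop, pvBLoop, List.filter, h1, h2, h3]
  rcases v1 with _ | s1 <;> rcases v2 with _ | s2 <;> rcases v3 with _ | s3 <;>
    simp only [PySem.List.index?_eq_idxOf?, List.idxOf?] <;>
    (first | cases e1 : s1 == p | skip) <;> (first | cases z1 : s1 == "" | skip) <;>
    (first | cases e2 : s2 == p | skip) <;> (first | cases z2 : s2 == "" | skip) <;>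
    (first | cases e3 : s3 == p | skip) <;> (first | cases z3 : s3 == "" | skip) <;>
    simp_all [List.findIdx?, List.findIdx?.go, beq_eq_decide]

-- ===== VERDICT (by name: the statement is the Claim_ definition above) =====
theorem behavioral_first_if_present_py_spec : Claim_equal_behavioral_first_if_present_py := by
  intro a p _
  exact key_lemma _ _ _ p a rfl rfl rfl
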